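-- pv_equiv track=rewrite | github.com/Seba-Quintana/sudoku | Papadimitriou_Yannakakis/sudoku4x4.py | is_MIS
-- ===== SOURCE A (Python) =====
-- def getQuadrant(x,y):
--     if 0 <= x <= 1 and 0 <= y <= 1:
--         return 0
--     elif 0 <= x <= 1 and 2 <= y <= 3:
--         return 1
--     elif 2 <= x <= 3 and 0 <= y <= 1:
--         return 2
--     elif 2 <= x <= 3 and 2 <= y <= 3:
--         return 3
--     else:
--         return "Fuera de rango"
--
-- def is_MIS(possible_MIS, grid, j):
--
--     for elem in possible_MIS:
--         if elem != j and (elem[0] == j[0] or elem[1] == j[1] or elem[2] == j[2]):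
--             return False
--
--
--     for x in range(len(grid)):
--         for y in range(len(grid)):
--             if(x == j[0] and y == j[1]):
--                 break
--             i = 0
--             for elem in possible_MIS:
--                 quadrant = getQuadrant(x,y)
--                 if elem[0] == x or elem[1] == y or elem[2] == quadrant:
--                     i = i + 1
--             if i == 0:
--                 return False
--         if(x == j[0] and y == j[1]):
--                 break
--     return True
-- ===== SOURCE B (Python) =====
-- def getQuadrant(x,y):
--     if 0 <= x <= 1 and 0 <= y <= 1:
--         return 0
--     elif 0 <= x <= 1 and 2 <= y <= 3:
--         return 1
--     elif 2 <= x <= 3 and 0 <= y <= 1: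
--         return 2
--     elif 2 <= x <= 3 and 2 <= y <= 3:
--         return 3
--     else:
--         return "Fuera de rango"
--
-- def is_MIS(possible_MIS, grid, j):
--     # conflict phase: any other element sharing a row, column or quadrant with j
--     if any(e != j and (e[0] == j[0] or e[1] == j[1] or e[2] == j[2]) for e in possible_MIS):
--         return False
--     n = len(grid)
--     # build the set of cells covered by some element of possible_MIS
--     covered = set()
--     for e in possible_MIS:
--         for t in range(n):
--             covered.add((e[0], t))
--             covered.add((t, e[1]))
--         for x in range(n):
--             for y in range(n):
--                 if getQuadrant(x, y) == e[2]:
--                     covered.add((x, y))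
--     # every cell strictly before (j[0], j[1]) in row-major order must be covered
--     for x in range(n):
--         for y in range(n):
--             if x == j[0] and y == j[1]:
--                 return True
--             if (x, y) not in covered:
--                 return False
--     return True
-- ===== Notes on version B (the rewrite author's own statement) =====
-- stated objective: alternative
-- what changed: Replaces A's per-cell inner scan of possible_MIS (with a counter and break-driven control flow) by building once a set of all covered cells (row, column and quadrant of each element) and then a single row-major scan of the prefix before (j[0], j[1]) testing membership.
-- outside the precondition, e.g. on is_MIS([(0, 9)], [[1]], (0, 9)): A returns True, B raises IndexError; on is_MIS([], [], ()): A returns True, B returns True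
import Mathlib
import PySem

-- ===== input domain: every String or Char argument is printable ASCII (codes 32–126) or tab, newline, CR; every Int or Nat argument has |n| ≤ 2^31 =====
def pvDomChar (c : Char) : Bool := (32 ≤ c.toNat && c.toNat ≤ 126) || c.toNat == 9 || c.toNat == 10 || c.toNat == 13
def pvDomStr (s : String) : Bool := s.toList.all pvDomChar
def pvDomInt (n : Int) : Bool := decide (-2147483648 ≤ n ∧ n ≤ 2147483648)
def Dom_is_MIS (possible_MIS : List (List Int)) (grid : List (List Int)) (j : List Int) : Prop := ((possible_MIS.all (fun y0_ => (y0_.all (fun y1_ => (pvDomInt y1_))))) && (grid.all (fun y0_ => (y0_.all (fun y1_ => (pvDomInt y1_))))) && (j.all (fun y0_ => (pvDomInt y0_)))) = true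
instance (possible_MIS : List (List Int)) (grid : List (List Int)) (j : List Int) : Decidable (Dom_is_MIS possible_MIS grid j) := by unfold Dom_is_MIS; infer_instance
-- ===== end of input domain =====

-- ===== PORT A =====
-- B differs from A only in the coverage phase's data structure; same return value.
-- getQuadrant: Python returns the STRING "Fuera de rango" out of range, which an int never equals;
-- modelled as Option Int with none there (exact: `elem[2] == quadrant` is `getQuadrant x y = some elem2`).
def getQuadrant (x : Int) (y : Int) : Option Int :=
  if 0 ≤ x ∧ x ≤ 1 ∧ 0 ≤ y ∧ y ≤ 1 then some 0
  else if 0 ≤ x ∧ x ≤ 1 ∧ 2 ≤ y ∧ y ≤ 3 then some 1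
  else if 2 ≤ x ∧ x ≤ 3 ∧ 0 ≤ y ∧ y ≤ 1 then some 2
  else if 2 ≤ x ∧ x ≤ 3 ∧ 2 ≤ y ∧ y ≤ 3 then some 3
  else none

-- l[i]: total form, exact under Pre_is_MIS (every accessed index is in range there)
def pvIdx (l : List Int) (i : Int) : Int := PySem.List.pyGetD l i 0

-- A's first loop: returns true iff it hits `return False`
def conflictLoop (pm : List (List Int)) (j : List Int) : Bool :=
  match pm with
  | [] => false
  | e :: rest =>
    if e ≠ j ∧ (pvIdx e 0 = pvIdx j 0 ∨ pvIdx e 1 = pvIdx j 1 ∨ pvIdx e 2 = pvIdx j 2)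
    then true
    else conflictLoop rest j

-- A's innermost loop: i = i + 1 per matching elem (Python rebinds quadrant = getQuadrant(x,y)
-- on every iteration; the value is the same each time, written inline here)
def countLoop (pm : List (List Int)) (x : Int) (y : Int) : Int :=
  pm.foldl (fun i e =>
    if pvIdx e 0 = x ∨ pvIdx e 1 = y ∨ getQuadrant x y = some (pvIdx e 2) then i + 1 else i) 0

-- A's loop over y: some true = hit the break at (j[0], j[1]) (the outer loop then also breaks,
-- since y is left equal to j[1]), some false = `return False`, none = row finished without break
def rowLoop (pm : List (List Int)) (j : List Int) (x : Int) (ys : List Int) : Option Bool :=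
  match ys with
  | [] => none
  | y :: rest =>
    if x = pvIdx j 0 ∧ y = pvIdx j 1 then some true
    else if countLoop pm x y = 0 then some false
    else rowLoop pm j x rest

def gridLoop (pm : List (List Int)) (j : List Int) (n : Int) (xs : List Int) : Bool :=
  match xs with
  | [] => true
  | x :: rest =>
    match rowLoop pm j x (PySem.List.pyRange 0 n 1) with
    | some b => b
    | none => gridLoop pm j n rest

def is_MIS (possible_MIS : List (List Int)) (grid : List (List Int)) (j : List Int) : Bool :=
  if conflictLoop possible_MIS j then false
  else gridLoop possible_MIS j (grid.length : Int) (PySem.List.pyRange 0 (grid.length : Int) 1)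

-- ===== PORT B =====
-- the grid's cells in row-major order (Source B's `for x in range(n): for y in range(n):`)
def pvCells (n : Int) : List (Int × Int) :=
  (PySem.List.pyRange 0 n 1).flatMap (fun x => (PySem.List.pyRange 0 n 1).map (fun y => (x, y)))

-- Source B's `covered` set: row, column and quadrant cells of every element
def coveredSet (pm : List (List Int)) (n : Int) : PySem.Set (Int × Int) :=
  pm.foldl (fun s e =>
    (pvCells n).foldl
      (fun s c => if getQuadrant c.1 c.2 = some (pvIdx e 2) then PySem.Set.add s c else s)
      ((PySem.List.pyRange 0 n 1).foldl
        (fun s t => PySem.Set.add (PySem.Set.add s (pvIdx e 0, t)) (t, pvIdx e 1)) s))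
    PySem.Set.empty

-- Source B's final scan of the row-major prefix before (j[0], j[1])
def scanLoop (covered : PySem.Set (Int × Int)) (j : List Int) : List (Int × Int) → Bool
  | [] => true
  | c :: rest =>
    if c.1 = pvIdx j 0 ∧ c.2 = pvIdx j 1 then true
    else if c ∉ covered then false
    else scanLoop covered j rest

def is_MIS_alt (possible_MIS : List (List Int)) (grid : List (List Int)) (j : List Int) : Bool :=
  if possible_MIS.any (fun e =>
      !(e == j) && (pvIdx e 0 == pvIdx j 0 || pvIdx e 1 == pvIdx j 1 || pvIdx e 2 == pvIdx j 2))
  then false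
  else
    scanLoop (coveredSet possible_MIS (grid.length : Int)) j (pvCells (grid.length : Int))

-- ===== PRECONDITION & SPEC =====
-- Pre_ restricts to the natural domain where every cell of possible_MIS and j is a (row, col, quadrant)
-- triple: outside it A (and B) generally raise IndexError; in residual corners that boolean
-- short-circuiting lets A return from, B's eager indexing may still raise.
def Pre_is_MIS (possible_MIS : List (List Int)) (grid : List (List Int)) (j : List Int) : Prop :=
  (∀ e ∈ possible_MIS, 3 ≤ e.length) ∧ 3 ≤ j.length
instance (possible_MIS : List (List Int)) (grid : List (List Int)) (j : List Int) : Decidable (Pre_is_MIS possible_MIS grid j) := by unfold Pre_is_MIS; infer_instance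

def pvWitness_is_MIS : List (List Int) × List (List Int) × List Int :=
  ([[0, 0, 0]], [[1, 2], [3, 4]], [0, 0, 0])

def Spec_is_MIS (possible_MIS : List (List Int)) (grid : List (List Int)) (j : List Int) (out : Bool) : Prop := out = is_MIS_alt possible_MIS grid j
instance (possible_MIS : List (List Int)) (grid : List (List Int)) (j : List Int) (out : Bool) : Decidable (Spec_is_MIS possible_MIS grid j out) := by unfold Spec_is_MIS; infer_instance

-- ===== CLAIM (what is proved, stated in full; the proofs are below) =====
def Claim_equal_is_MIS : Prop := ∀ (possible_MIS : List (List Int)) (grid : List (List Int)) (j : List Int), Dom_is_MIS possible_MIS grid j → Pre_is_MIS possible_MIS grid j → Spec_is_MIS possible_MIS grid j (is_MIS possible_MIS grid j)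

-- ===== LEMMAS AND PROOFS =====

-- the cell-coverage test as a pure predicate, shared by the two reductions
def covB (pm : List (List Int)) (x : Int) (y : Int) : Bool :=
  pm.any (fun e => pvIdx e 0 == x || pvIdx e 1 == y || getQuadrant x y == some (pvIdx e 2))

-- reference scan: row-major cells, coverage decided by covB
def scanCov (pm : List (List Int)) (j : List Int) : List (Int × Int) → Bool
  | [] => true
  | c :: rest =>
    if c.1 = pvIdx j 0 ∧ c.2 = pvIdx j 1 then true
    else if covB pm c.1 c.2 then scanCov pm j rest
    else false

theorem conflict_eq (pm : List (List Int)) (j : List Int) :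
    conflictLoop pm j = pm.any (fun e =>
      !(e == j) && (pvIdx e 0 == pvIdx j 0 || pvIdx e 1 == pvIdx j 1 || pvIdx e 2 == pvIdx j 2)) := by
  induction pm with
  | nil => rfl
  | cons e rest ih =>
    simp only [conflictLoop, List.any_cons, ← ih]
    by_cases h : e ≠ j ∧ (pvIdx e 0 = pvIdx j 0 ∨ pvIdx e 1 = pvIdx j 1 ∨ pvIdx e 2 = pvIdx j 2)
    · have hb : (!(e == j) && (pvIdx e 0 == pvIdx j 0 || pvIdx e 1 == pvIdx j 1 || pvIdx e 2 == pvIdx j 2)) = true := by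
        obtain ⟨h1, h2⟩ := h
        rcases h2 with h2 | h2 | h2 <;> simp [h1, h2]
      rw [if_pos h, hb, Bool.true_or]
    · have hb : (!(e == j) && (pvIdx e 0 == pvIdx j 0 || pvIdx e 1 == pvIdx j 1 || pvIdx e 2 == pvIdx j 2)) = false := by
        rw [not_and_or] at h
        rcases h with h | h
        · simp only [ne_eq, not_not] at h
          simp [h]
        · rw [not_or, not_or] at h
          simp [h.1, h.2.1, h.2.2]
      rw [if_neg h, hb, Bool.false_or]

theorem foldl_count (x y : Int) (pm : List (List Int)) : ∀ a : Int,
    pm.foldl (fun i e =>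
        if pvIdx e 0 = x ∨ pvIdx e 1 = y ∨ getQuadrant x y = some (pvIdx e 2) then i + 1 else i) a
      = a + (pm.countP (fun e => pvIdx e 0 == x || pvIdx e 1 == y || getQuadrant x y == some (pvIdx e 2)) : Int) := by
  induction pm with
  | nil => intro a; simp
  | cons e rest ih =>
    intro a
    simp only [List.foldl_cons, List.countP_cons, ih]
    by_cases h : pvIdx e 0 = x ∨ pvIdx e 1 = y ∨ getQuadrant x y = some (pvIdx e 2)
    · have hb : (pvIdx e 0 == x || pvIdx e 1 == y || getQuadrant x y == some (pvIdx e 2)) = true := by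
        simp only [Bool.or_eq_true, beq_iff_eq]
        tauto
      rw [if_pos h, hb, if_pos rfl]
      push_cast
      ring
    · have hb : (pvIdx e 0 == x || pvIdx e 1 == y || getQuadrant x y == some (pvIdx e 2)) = false := by
        cases hball : (pvIdx e 0 == x || pvIdx e 1 == y || getQuadrant x y == some (pvIdx e 2))
        · rfl
        · exfalso
          apply h
          have hd : (pvIdx e 0 = x ∨ pvIdx e 1 = y) ∨ getQuadrant x y = some (pvIdx e 2) := by
            simpa using hball
          tauto
      rw [if_neg h, hb]
      simp

theorem count_zero (pm : List (List Int)) (x y : Int) :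
    (countLoop pm x y = 0) ↔ covB pm x y = false := by
  unfold countLoop covB
  rw [foldl_count x y pm 0, zero_add]
  constructor
  · intro h
    have h0 : pm.countP (fun e => pvIdx e 0 == x || pvIdx e 1 == y || getQuadrant x y == some (pvIdx e 2)) = 0 := by
      exact_mod_cast h
    rw [List.countP_eq_zero] at h0
    rw [List.any_eq_false]
    intro e he
    simpa using h0 e he
  · intro h
    rw [List.any_eq_false] at h
    have h0 : pm.countP (fun e => pvIdx e 0 == x || pvIdx e 1 == y || getQuadrant x y == some (pvIdx e 2)) = 0 :=
      List.countP_eq_zero.2 (fun e he => by simpa using h e he)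
    exact_mod_cast h0

theorem row_scan (pm : List (List Int)) (j : List Int) (x : Int) (ys : List Int) (tail : List (Int × Int)) :
    scanCov pm j ((ys.map (fun y => (x, y))) ++ tail) =
      (match rowLoop pm j x ys with | some b => b | none => scanCov pm j tail) := by
  induction ys with
  | nil => rfl
  | cons y rest ih =>
    simp only [List.map_cons, List.cons_append, scanCov, rowLoop]
    by_cases h1 : x = pvIdx j 0 ∧ y = pvIdx j 1
    · rw [if_pos h1, if_pos h1]
    · rw [if_neg h1, if_neg h1]
      by_cases h2 : countLoop pm x y = 0
      · have hc : covB pm x y = false := (count_zero pm x y).1 h2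
        rw [if_pos h2, hc]
        simp
      · have hc : covB pm x y = true := by
          cases hcv : covB pm x y
          · exact absurd ((count_zero pm x y).2 hcv) h2
          · rfl
        rw [if_neg h2, hc]
        simpa using ih

theorem grid_scan (pm : List (List Int)) (j : List Int) (n : Int) (xs : List Int) :
    gridLoop pm j n xs =
      scanCov pm j (xs.flatMap (fun x => (PySem.List.pyRange 0 n 1).map (fun y => (x, y)))) := by
  induction xs with
  | nil => rfl
  | cons x rest ih =>
    simp only [gridLoop, List.flatMap_cons, row_scan, ih]

theorem mem_rcFold (e0 e1 : Int) (l : List Int) (s : PySem.Set (Int × Int)) (c : Int × Int) :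
    (c ∈ l.foldl (fun s t => PySem.Set.add (PySem.Set.add s (e0, t)) (t, e1)) s) ↔
      c ∈ s ∨ ∃ t ∈ l, c = (e0, t) ∨ c = (t, e1) := by
  induction l generalizing s with
  | nil => simp
  | cons t rest ih =>
    simp only [List.foldl_cons, ih, PySem.Set.mem_add, List.mem_cons]
    constructor
    · rintro (((h | h) | h) | ⟨u, hu, h⟩)
      · exact Or.inl h
      · exact Or.inr ⟨t, Or.inl rfl, Or.inl h⟩
      · exact Or.inr ⟨t, Or.inl rfl, Or.inr h⟩
      · exact Or.inr ⟨u, Or.inr hu, h⟩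
    · rintro (h | ⟨u, (rfl | hu), h⟩)
      · exact Or.inl (Or.inl (Or.inl h))
      · rcases h with h | h
        · exact Or.inl (Or.inl (Or.inr h))
        · exact Or.inl (Or.inr h)
      · exact Or.inr ⟨u, hu, h⟩

theorem mem_qFold (e2 : Int) (l : List (Int × Int)) (s : PySem.Set (Int × Int)) (c : Int × Int) :
    (c ∈ l.foldl (fun s c' => if getQuadrant c'.1 c'.2 = some e2 then PySem.Set.add s c' else s) s) ↔
      c ∈ s ∨ (c ∈ l ∧ getQuadrant c.1 c.2 = some e2) := by
  induction l generalizing s with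
  | nil => simp
  | cons d rest ih =>
    simp only [List.foldl_cons, List.mem_cons]
    split_ifs with hq
    · rw [ih]
      simp only [PySem.Set.mem_add]
      constructor
      · rintro ((h | rfl) | ⟨h1, h2⟩)
        · exact Or.inl h
        · exact Or.inr ⟨Or.inl rfl, hq⟩
        · exact Or.inr ⟨Or.inr h1, h2⟩
      · rintro (h | ⟨(rfl | h1), h2⟩)
        · exact Or.inl (Or.inl h)
        · exact Or.inl (Or.inr rfl)
        · exact Or.inr ⟨h1, h2⟩
    · rw [ih]
      constructor
      · rintro (h | ⟨h1, h2⟩)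
        · exact Or.inl h
        · exact Or.inr ⟨Or.inr h1, h2⟩
      · rintro (h | ⟨(rfl | h1), h2⟩)
        · exact Or.inl h
        · exact absurd h2 hq
        · exact Or.inr ⟨h1, h2⟩

theorem mem_cells (n : Int) (c : Int × Int) :
    c ∈ pvCells n ↔ c.1 ∈ PySem.List.pyRange 0 n 1 ∧ c.2 ∈ PySem.List.pyRange 0 n 1 := by
  obtain ⟨x, y⟩ := c
  simp only [pvCells, List.mem_flatMap, List.mem_map, Prod.mk.injEq]
  constructor
  · rintro ⟨a, ha, b, hb, rfl, rfl⟩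
    exact ⟨ha, hb⟩
  · rintro ⟨hx, hy⟩
    exact ⟨x, hx, y, hy, rfl, rfl⟩

theorem mem_coveredAux (pm : List (List Int)) (n : Int) (c : Int × Int) : ∀ s : PySem.Set (Int × Int),
    (c ∈ pm.foldl (fun s e =>
      (pvCells n).foldl
        (fun s c => if getQuadrant c.1 c.2 = some (pvIdx e 2) then PySem.Set.add s c else s)
        ((PySem.List.pyRange 0 n 1).foldl
          (fun s t => PySem.Set.add (PySem.Set.add s (pvIdx e 0, t)) (t, pvIdx e 1)) s)) s) ↔
    c ∈ s ∨ ∃ e ∈ pm,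
      (∃ t ∈ PySem.List.pyRange 0 n 1, c = (pvIdx e 0, t) ∨ c = (t, pvIdx e 1)) ∨
      (c ∈ pvCells n ∧ getQuadrant c.1 c.2 = some (pvIdx e 2)) := by
  induction pm with
  | nil => intro s; simp
  | cons e rest ih =>
    intro s
    simp only [List.foldl_cons, ih, mem_qFold, mem_rcFold, List.mem_cons]
    constructor
    · rintro (((h | h) | h) | ⟨u, hu, h⟩)
      · exact Or.inl h
      · exact Or.inr ⟨e, Or.inl rfl, Or.inl h⟩
      · exact Or.inr ⟨e, Or.inl rfl, Or.inr h⟩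
      · exact Or.inr ⟨u, Or.inr hu, h⟩
    · rintro (h | ⟨u, (rfl | hu), (h | h)⟩)
      · exact Or.inl (Or.inl (Or.inl h))
      · exact Or.inl (Or.inl (Or.inr h))
      · exact Or.inl (Or.inr h)
      · exact Or.inr ⟨u, hu, Or.inl h⟩
      · exact Or.inr ⟨u, hu, Or.inr h⟩

theorem mem_covered (pm : List (List Int)) (n : Int) (x y : Int)
    (hx : x ∈ PySem.List.pyRange 0 n 1) (hy : y ∈ PySem.List.pyRange 0 n 1) :
    ((x, y) ∈ coveredSet pm n) ↔ covB pm x y = true := by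
  unfold coveredSet
  rw [mem_coveredAux]
  rw [covB, List.any_eq_true]
  constructor
  · rintro (h | ⟨e, he, h⟩)
    · simp [PySem.Set.empty] at h
    · refine ⟨e, he, ?_⟩
      simp only [Bool.or_eq_true, beq_iff_eq]
      rcases h with ⟨t, ht, (h | h)⟩ | ⟨hc, hq⟩
      · rw [Prod.mk.injEq] at h
        exact Or.inl (Or.inl h.1.symm)
      · rw [Prod.mk.injEq] at h
        exact Or.inl (Or.inr h.2.symm)
      · exact Or.inr hq
  · rintro ⟨e, he, hf⟩
    simp only [Bool.or_eq_true, beq_iff_eq] at hf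
    refine Or.inr ⟨e, he, ?_⟩
    rcases hf with (h | h) | h
    · exact Or.inl ⟨y, hy, Or.inl (by rw [h])⟩
    · exact Or.inl ⟨x, hx, Or.inr (by rw [h])⟩
    · exact Or.inr ⟨(mem_cells n (x, y)).2 ⟨hx, hy⟩, h⟩

theorem scan_eq (pm : List (List Int)) (j : List Int) (n : Int) (cells : List (Int × Int))
    (h : ∀ c ∈ cells, c.1 ∈ PySem.List.pyRange 0 n 1 ∧ c.2 ∈ PySem.List.pyRange 0 n 1) :
    scanLoop (coveredSet pm n) j cells = scanCov pm j cells := by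
  induction cells with
  | nil => rfl
  | cons c rest ih =>
    have hc := h c List.mem_cons_self
    have hrest : ∀ d ∈ rest, d.1 ∈ PySem.List.pyRange 0 n 1 ∧ d.2 ∈ PySem.List.pyRange 0 n 1 :=
      fun d hd => h d (List.mem_cons_of_mem _ hd)
    have hmem : (c ∈ coveredSet pm n) ↔ covB pm c.1 c.2 = true := by
      have h2 := mem_covered pm n c.1 c.2 hc.1 hc.2
      rwa [Prod.mk.eta] at h2
    simp only [scanLoop, scanCov]
    by_cases h1 : c.1 = pvIdx j 0 ∧ c.2 = pvIdx j 1
    · rw [if_pos h1, if_pos h1]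
    · rw [if_neg h1, if_neg h1]
      cases hcv : covB pm c.1 c.2 with
      | false =>
        have hout : c ∉ coveredSet pm n := by
          rw [hmem, hcv]
          simp
        rw [if_pos hout, if_neg (by simp)]
      | true =>
        have hin : c ∈ coveredSet pm n := hmem.2 hcv
        rw [if_neg (by simpa using hin), if_pos (by simp)]
        exact ih hrest

-- ===== VERDICT (by name: the statement is the Claim_ definition above) =====
theorem is_MIS_spec : Claim_equal_is_MIS := by
  intro pm grid j _ _
  unfold Spec_is_MIS is_MIS is_MIS_alt
  rw [conflict_eq]
  split_ifs with h
  · rfl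
  · rw [grid_scan]
    have hcells : ((PySem.List.pyRange 0 (grid.length : Int) 1).flatMap
        (fun x => (PySem.List.pyRange 0 (grid.length : Int) 1).map (fun y => (x, y)))) =
        pvCells (grid.length : Int) := rfl
    rw [hcells, scan_eq]
    intro c hc
    exact (mem_cells _ c).1 hc
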